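-- pv_equiv track=rewrite | github.com/leonard112/OctaneScript | src/core/Expression.py | reconcatenate_nested_object
-- ===== SOURCE A (Python) =====
-- def reconcatenate_nested_object(array_tokens, start_delimiter, end_delimiter):
--     start_delimiter_count = 0
--     end_delimiter_count = 0
--     result_array_tokens = []
--     concatenated_element = ""
--     for token in array_tokens:
--         token = token.strip()
--         if token != "":
--             if len(token) != 0:
--                 start_delimiter_count += token.count(start_delimiter)
--                 end_delimiter_count += token.count(end_delimiter)
--             if start_delimiter_count == end_delimiter_count:
--                 if concatenated_element != "":
--                     token = concatenated_element + token
--                     concatenated_element = ""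
--                 result_array_tokens.append(token)
--             else:
--                 concatenated_element += token + ", "
--     return result_array_tokens
-- ===== SOURCE B (Python) =====
-- def _balanced_prefix_end(tokens, start, start_delimiter, end_delimiter):
--     # index (exclusive) of the shortest balanced prefix of tokens[start:], or None
--     balance = 0
--     for i in range(start, len(tokens)):
--         balance += tokens[i].count(start_delimiter) - tokens[i].count(end_delimiter)
--         if balance == 0:
--             return i + 1
--     return None
--
--
-- def reconcatenate_nested_object(array_tokens, start_delimiter, end_delimiter):
--     tokens = [t for t in map(str.strip, array_tokens) if t]
--     result = []
--     start = 0
--     while start < len(tokens):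
--         end = _balanced_prefix_end(tokens, start, start_delimiter, end_delimiter)
--         if end is None:
--             break
--         result.append(", ".join(tokens[start:end]))
--         start = end
--     return result
-- ===== Notes on version B (the rewrite author's own statement) =====
-- stated objective: alternative
-- what changed: Instead of A's single accumulation loop with two cumulative counters and an in-place string buffer, B first builds the cleaned token list and then repeatedly searches for the shortest delimiter-balanced prefix of the remaining tokens (a separate index-scanning helper), emitting each group as a ', '.join of a slice; grouping is driven by computed cut indices, not by flushing an accumulator.
import Mathlib
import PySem

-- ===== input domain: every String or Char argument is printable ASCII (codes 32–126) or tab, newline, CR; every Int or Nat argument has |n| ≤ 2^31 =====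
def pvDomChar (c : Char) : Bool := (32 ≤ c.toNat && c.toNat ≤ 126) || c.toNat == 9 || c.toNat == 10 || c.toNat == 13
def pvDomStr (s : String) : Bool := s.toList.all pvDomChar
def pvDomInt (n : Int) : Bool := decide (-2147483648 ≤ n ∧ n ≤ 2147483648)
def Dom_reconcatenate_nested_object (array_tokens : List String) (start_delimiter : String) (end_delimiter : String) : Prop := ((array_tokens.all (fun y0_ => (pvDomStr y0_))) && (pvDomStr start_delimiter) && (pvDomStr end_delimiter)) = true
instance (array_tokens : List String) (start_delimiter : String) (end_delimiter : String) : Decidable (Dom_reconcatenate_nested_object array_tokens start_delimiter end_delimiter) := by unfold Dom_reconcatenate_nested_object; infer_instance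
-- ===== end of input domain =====

-- B replaces A's single accumulation loop (two cumulative counters + in-place string buffer)
-- by staged cut-index grouping: clean the tokens once, then repeatedly find the shortest
-- delimiter-balanced prefix of the remaining tokens with an index-scanning helper and emit it
-- as ", ".join of a slice. Equivalence of the return value is proved on the whole domain.

-- ===== PORT A =====
-- one iteration of A's loop body (strip, skip empties, update counters, flush or accumulate)
def pvStepA (start_delimiter end_delimiter : String)
    (st : Nat × Nat × List String × String) (token : String) :
    Nat × Nat × List String × String :=
  match st with
  | (sdc, edc, result, conc) =>
    let token := PySem.Str.strip token
    if token ≠ "" then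
      let sdc := if PySem.Str.len token ≠ 0 then sdc + PySem.Str.count token start_delimiter else sdc
      let edc := if PySem.Str.len token ≠ 0 then edc + PySem.Str.count token end_delimiter else edc
      if sdc = edc then
        if conc ≠ "" then (sdc, edc, result ++ [conc ++ token], "")
        else (sdc, edc, result ++ [token], "")
      else (sdc, edc, result, conc ++ token ++ ", ")
    else (sdc, edc, result, conc)

def reconcatenate_nested_object (array_tokens : List String) (start_delimiter : String) (end_delimiter : String) : List String :=
  (array_tokens.foldl (pvStepA start_delimiter end_delimiter) (0, 0, [], "")).2.2.1

-- ===== PORT B =====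
-- _balanced_prefix_end: the `for i in range(start, len(tokens))` scan, iterated as the
-- suffix tokens[start:] with i tracking the Python index; returns i+1 at the first zero balance
def pvScanGo (start_delimiter end_delimiter : String) (balance : Int) (i : Nat) :
    List String → Option Nat
  | [] => none
  | t :: ts =>
    if balance + ((PySem.Str.count t start_delimiter : Int)
        - (PySem.Str.count t end_delimiter : Int)) = 0 then some (i + 1)
    else pvScanGo start_delimiter end_delimiter
      (balance + ((PySem.Str.count t start_delimiter : Int)
        - (PySem.Str.count t end_delimiter : Int))) (i + 1) ts

-- B's while loop; `start` strictly increases each iteration, so fuel `tokens.length + 1`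
-- (supplied at the call site) makes the recursion structural without changing any value
def pvLoopB (start_delimiter end_delimiter : String) (tokens : List String) :
    Nat → List String → Nat → List String
  | 0, result, _ => result
  | fuel + 1, result, start =>
    if start < tokens.length then
      match pvScanGo start_delimiter end_delimiter 0 start (tokens.drop start) with
      | none => result
      | some e =>
        pvLoopB start_delimiter end_delimiter tokens fuel
          (result ++ [PySem.Str.join ", " (PySem.List.slice tokens (some (start : Int)) (some (e : Int)))]) e
    else result

def reconcatenate_nested_object_alt (array_tokens : List String) (start_delimiter : String) (end_delimiter : String) : List String :=
  let tokens := (array_tokens.map PySem.Str.strip).filter (fun t => t ≠ "")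
  pvLoopB start_delimiter end_delimiter tokens (tokens.length + 1) [] 0

-- ===== PRECONDITION & SPEC =====
def Spec_reconcatenate_nested_object (array_tokens : List String) (start_delimiter : String) (end_delimiter : String) (out : List String) : Prop := out = reconcatenate_nested_object_alt array_tokens start_delimiter end_delimiter
instance (array_tokens : List String) (start_delimiter : String) (end_delimiter : String) (out : List String) : Decidable (Spec_reconcatenate_nested_object array_tokens start_delimiter end_delimiter out) := by unfold Spec_reconcatenate_nested_object; infer_instance

-- ===== CLAIM (what is proved, stated in full; the proofs are below) =====
def Claim_equal_reconcatenate_nested_object : Prop := ∀ (array_tokens : List String) (start_delimiter : String) (end_delimiter : String), Dom_reconcatenate_nested_object array_tokens start_delimiter end_delimiter → Spec_reconcatenate_nested_object array_tokens start_delimiter end_delimiter (reconcatenate_nested_object array_tokens start_delimiter end_delimiter)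

-- ===== LEMMAS AND PROOFS =====

-- per-token delimiter balance and its sum over a group
def pvDelta (sd ed t : String) : Int :=
  (PySem.Str.count t sd : Int) - (PySem.Str.count t ed : Int)

def pvBal (sd ed : String) (g : List String) : Int := (g.map (pvDelta sd ed)).sum

-- structural version of the balanced-prefix search (length of the shortest balanced prefix)
def pvSplit (sd ed : String) (bal : Int) : List String → Option Nat
  | [] => none
  | t :: ts =>
    if bal + pvDelta sd ed t = 0 then some 1
    else (pvSplit sd ed (bal + pvDelta sd ed t) ts).map (· + 1)

theorem pvSplit_pos (sd ed : String) :
    ∀ (ts : List String) (bal : Int) (k : Nat), pvSplit sd ed bal ts = some k →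
      1 ≤ k ∧ k ≤ ts.length := by
  intro ts
  induction ts with
  | nil => intro bal k h; simp [pvSplit] at h
  | cons t ts ih =>
    intro bal k h
    simp only [pvSplit] at h
    split at h
    · cases h; simp
    · rcases Option.map_eq_some_iff.mp h with ⟨k', hk', rfl⟩
      have := ih _ _ hk'
      simp; omega

-- the no-balanced-prefix case
theorem pvSplit_none (sd ed : String) :
    ∀ (g : List String) (bal : Int),
      (∀ k, 1 ≤ k → k ≤ g.length → bal + pvBal sd ed (g.take k) ≠ 0) →
      pvSplit sd ed bal g = none := by
  intro g
  induction g with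
  | nil => intro bal _; rfl
  | cons t ts ih =>
    intro bal hpre
    have h1 : bal + pvDelta sd ed t ≠ 0 := by
      have := hpre 1 (by omega) (by simp)
      simpa [pvBal] using this
    have hrec := ih (bal + pvDelta sd ed t) (by
      intro k hk1 hk2
      have := hpre (k + 1) (by omega) (by simpa using by omega)
      simpa [pvBal, add_assoc] using this)
    simp [pvSplit, if_neg h1, hrec]

-- the first balanced prefix of g ++ t' :: rest is g ++ [t'] when g's prefixes are unbalanced
theorem pvSplit_append (sd ed : String) :
    ∀ (g : List String) (bal : Int) (t' : String) (rest : List String),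
      (∀ k, 1 ≤ k → k ≤ g.length → bal + pvBal sd ed (g.take k) ≠ 0) →
      bal + pvBal sd ed (g ++ [t']) = 0 →
      pvSplit sd ed bal (g ++ t' :: rest) = some (g.length + 1) := by
  intro g
  induction g with
  | nil =>
    intro bal t' rest _ hz
    simp only [pvBal, List.nil_append, List.map_cons, List.map_nil, List.sum_cons, List.sum_nil,
      add_zero] at hz
    simp [pvSplit, hz]
  | cons g0 gs ih =>
    intro bal t' rest hpre hz
    have h1 : bal + pvDelta sd ed g0 ≠ 0 := by
      have := hpre 1 (by omega) (by simp)
      simpa [pvBal] using this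
    have hrec := ih (bal + pvDelta sd ed g0) t' rest
      (by
        intro k hk1 hk2
        have := hpre (k + 1) (by omega) (by simpa using by omega)
        simpa [pvBal, add_assoc] using this)
      (by simpa [pvBal, add_assoc] using hz)
    simp only [List.cons_append, pvSplit, if_neg h1, hrec]
    simp

-- grouping as fuelled structural recursion: cut the shortest balanced prefix and repeat
def pvGroupsLF (sd ed : String) : Nat → List String → List String
  | 0, _ => []
  | fuel + 1, tokens =>
    match pvSplit sd ed 0 tokens with
    | none => []
    | some k => PySem.Str.join ", " (tokens.take k) :: pvGroupsLF sd ed fuel (tokens.drop k)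

-- pvScanGo with index i is pvSplit on the same list, shifted by i
theorem pvScanGo_eq_split (sd ed : String) :
    ∀ (ts : List String) (bal : Int) (i : Nat),
      pvScanGo sd ed bal i ts = (pvSplit sd ed bal ts).map (i + ·) := by
  intro ts
  induction ts with
  | nil => intro bal i; rfl
  | cons t ts ih =>
    intro bal i
    simp only [pvScanGo, pvSplit, pvDelta]
    by_cases hb : bal + ((PySem.Str.count t sd : Int) - (PySem.Str.count t ed : Int)) = 0
    · rw [if_pos hb, if_pos hb]; rfl
    · rw [if_neg hb, if_neg hb, ih _ (i + 1), Option.map_map]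
      congr 1
      funext k
      simp; omega

-- B's while loop computes the fuelled grouping of the remaining suffix
theorem pvLoopB_eq_groups (sd ed : String) (tokens : List String) :
    ∀ (fuel gfuel start : Nat) (res : List String),
      tokens.length - start < fuel → (tokens.drop start).length < gfuel →
      pvLoopB sd ed tokens fuel res start = res ++ pvGroupsLF sd ed gfuel (tokens.drop start) := by
  intro fuel
  induction fuel with
  | zero => intro gfuel start res hf hg; omega
  | succ m ih =>
    intro gfuel start res hf hg
    cases gfuel with
    | zero => omega
    | succ g =>
      simp only [pvLoopB]
      by_cases hs : start < tokens.length
      · rw [if_pos hs, pvScanGo_eq_split]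
        cases hsp : pvSplit sd ed 0 (tokens.drop start) with
        | none =>
          simp only [hsp, Option.map_none, pvGroupsLF]
          simp
        | some k =>
          simp only [hsp, Option.map_some]
          have hk := pvSplit_pos sd ed _ _ _ hsp
          simp only [List.length_drop] at hk hg
          have hslice : PySem.List.slice tokens (some (start : Int)) (some ((start + k : Nat) : Int))
              = (tokens.drop start).take k := by
            rw [PySem.List.slice_natCast]
            congr 1
            omega
          have hdrop2 : tokens.drop (start + k) = (tokens.drop start).drop k := by
            rw [List.drop_drop]
          rw [hslice, ih g (start + k) _ (by omega) (by simp only [List.length_drop]; omega)]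
          simp only [pvGroupsLF]
          rw [hsp, hdrop2]
          simp
      · rw [if_neg hs]
        rw [List.drop_eq_nil_of_le (by omega)]
        simp [pvGroupsLF, pvSplit]

theorem pvLen_ne (t : String) (h : PySem.Str.strip t ≠ "") :
    PySem.Str.len (PySem.Str.strip t) ≠ 0 := by
  simp only [PySem.Str.len]
  intro h0
  exact h (String.toList_inj.mp (List.eq_nil_of_length_eq_zero (by simpa using h0)))

-- branch-wise unfoldings of A's loop body
theorem pvStepA_skip (sd ed : String) (sdc edc : Nat) (res : List String) (conc t : String)
    (h : PySem.Str.strip t = "") :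
    pvStepA sd ed (sdc, edc, res, conc) t = (sdc, edc, res, conc) := by
  simp [pvStepA, h]

theorem pvStepA_flush_conc (sd ed : String) (sdc edc : Nat) (res : List String) (conc t : String)
    (h : PySem.Str.strip t ≠ "")
    (heq : sdc + PySem.Str.count (PySem.Str.strip t) sd = edc + PySem.Str.count (PySem.Str.strip t) ed)
    (hconc : conc ≠ "") :
    pvStepA sd ed (sdc, edc, res, conc) t =
      (sdc + PySem.Str.count (PySem.Str.strip t) sd, edc + PySem.Str.count (PySem.Str.strip t) ed,
        res ++ [conc ++ PySem.Str.strip t], "") := by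
  have hl := pvLen_ne t h
  simp only [pvStepA]
  split_ifs <;> rfl

theorem pvStepA_flush_empty (sd ed : String) (sdc edc : Nat) (res : List String) (t : String)
    (h : PySem.Str.strip t ≠ "")
    (heq : sdc + PySem.Str.count (PySem.Str.strip t) sd = edc + PySem.Str.count (PySem.Str.strip t) ed) :
    pvStepA sd ed (sdc, edc, res, "") t =
      (sdc + PySem.Str.count (PySem.Str.strip t) sd, edc + PySem.Str.count (PySem.Str.strip t) ed,
        res ++ [PySem.Str.strip t], "") := by
  have hl := pvLen_ne t h
  simp only [pvStepA]
  split_ifs <;> rfl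

theorem pvStepA_accum (sd ed : String) (sdc edc : Nat) (res : List String) (conc t : String)
    (h : PySem.Str.strip t ≠ "")
    (hne : ¬ sdc + PySem.Str.count (PySem.Str.strip t) sd = edc + PySem.Str.count (PySem.Str.strip t) ed) :
    pvStepA sd ed (sdc, edc, res, conc) t =
      (sdc + PySem.Str.count (PySem.Str.strip t) sd, edc + PySem.Str.count (PySem.Str.strip t) ed,
        res, conc ++ PySem.Str.strip t ++ ", ") := by
  have hl := pvLen_ne t h
  simp only [pvStepA]
  split_ifs <;> rfl

-- A's accumulator as a char list: every group token followed by ", "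
def pvTrail (grp : List String) : List Char :=
  (grp.map (fun t => t.toList ++ (", ").toList)).flatten

theorem pvTrail_append (grp : List String) (t : String) :
    pvTrail (grp ++ [t]) = pvTrail grp ++ t.toList ++ (", ").toList := by
  simp [pvTrail]

theorem pvJoin_append (grp : List String) (t : String) :
    PySem.Chars.join (", ").toList ((grp ++ [t]).map String.toList)
      = pvTrail grp ++ t.toList := by
  induction grp with
  | nil => simp [pvTrail, PySem.Chars.join_singleton]
  | cons g gs ih =>
    cases gs with
    | nil =>
      simp [pvTrail, PySem.Chars.join_cons_cons, PySem.Chars.join_singleton]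
    | cons g' gs' =>
      simp only [List.cons_append, List.map_cons, PySem.Chars.join_cons_cons] at ih ⊢
      simp [pvTrail] at ih ⊢
      simp [ih]

theorem pvTrail_eq_nil (grp : List String) (h : pvTrail grp = []) : grp = [] := by
  cases grp with
  | nil => rfl
  | cons g gs => simp [pvTrail] at h

-- flush value: A's conc ++ token equals B's ", ".join (group ++ [token])
theorem pvFlush_eq (conc token : String) (grp : List String)
    (hc : conc.toList = pvTrail grp) :
    conc ++ token = PySem.Str.join ", " (grp ++ [token]) := by
  apply String.toList_inj.mp
  simp only [PySem.Str.toList_join, String.toList_append, hc, pvJoin_append]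

-- main invariant: A's fold equals res ++ fuelled grouping of (ghost group ++ cleaned rest)
theorem pvMain (sd ed : String) :
    ∀ (l : List String) (sdc edc : Nat) (res : List String) (conc : String) (grp : List String)
      (gfuel : Nat),
      conc.toList = pvTrail grp →
      (sdc : Int) - (edc : Int) = pvBal sd ed grp →
      (∀ k, 1 ≤ k → k ≤ grp.length → pvBal sd ed (grp.take k) ≠ 0) →
      (grp ++ (l.map PySem.Str.strip).filter (fun t => t ≠ "")).length < gfuel →
      (l.foldl (pvStepA sd ed) (sdc, edc, res, conc)).2.2.1
        = res ++ pvGroupsLF sd ed gfuel (grp ++ (l.map PySem.Str.strip).filter (fun t => t ≠ "")) := by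
  intro l
  induction l with
  | nil =>
    intro sdc edc res conc grp gfuel hc hb hpre hg
    simp only [List.map_nil, List.filter_nil, List.append_nil] at hg ⊢
    cases gfuel with
    | zero => omega
    | succ g =>
      simp only [List.foldl_nil, pvGroupsLF]
      rw [pvSplit_none sd ed grp 0 (by intro k h1 h2; simpa using hpre k h1 h2)]
      simp
  | cons t ts ih =>
    intro sdc edc res conc grp gfuel hc hb hpre hg
    by_cases ht : PySem.Str.strip t = ""
    · simp only [List.map_cons, List.filter_cons, ht, List.foldl_cons,
        pvStepA_skip sd ed sdc edc res conc t ht]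
      simp only [List.map_cons, List.filter_cons, ht] at hg
      simpa using ih sdc edc res conc grp gfuel hc hb hpre (by simpa using hg)
    · have hfil : ((t :: ts).map PySem.Str.strip).filter (fun t => t ≠ "")
          = PySem.Str.strip t :: ((ts.map PySem.Str.strip).filter (fun t => t ≠ "")) := by
        simp [List.filter_cons, ht]
      set t' := PySem.Str.strip t with ht'
      set rest := (ts.map PySem.Str.strip).filter (fun t => t ≠ "") with hrest
      rw [hfil] at hg ⊢
      rw [List.foldl_cons]
      have hlen : grp.length + rest.length + 1 < gfuel := by
        simp only [List.length_append, List.length_cons] at hg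
        omega
      have hap : pvBal sd ed (grp ++ [t']) = pvBal sd ed grp + pvDelta sd ed t' := by
        simp [pvBal]
      by_cases heq : sdc + PySem.Str.count t' sd = edc + PySem.Str.count t' ed
      · -- balanced: A flushes, the grouping cuts exactly here
        have heqZ : (sdc : Int) + (PySem.Str.count t' sd : Int)
            = (edc : Int) + (PySem.Str.count t' ed : Int) := by exact_mod_cast heq
        have hz : (0 : Int) + pvBal sd ed (grp ++ [t']) = 0 := by
          rw [hap, ← hb]; unfold pvDelta; omega
        have hsplit := pvSplit_append sd ed grp 0 t' rest
          (by intro k h1 h2; simpa using hpre k h1 h2) hz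
        obtain ⟨g, rfl⟩ : ∃ g, gfuel = g + 1 := ⟨gfuel - 1, by omega⟩
        have hgr : pvGroupsLF sd ed (g + 1) (grp ++ t' :: rest)
            = PySem.Str.join ", " (grp ++ [t']) :: pvGroupsLF sd ed g rest := by
          simp only [pvGroupsLF]
          rw [hsplit]
          dsimp only
          have htake : (grp ++ t' :: rest).take (grp.length + 1) = grp ++ [t'] := by
            have hsp : grp ++ t' :: rest = (grp ++ [t']) ++ rest := by simp
            rw [hsp, List.take_left' (by simp)]
          have hdrop : (grp ++ t' :: rest).drop (grp.length + 1) = rest := by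
            have hsp : grp ++ t' :: rest = (grp ++ [t']) ++ rest := by simp
            rw [hsp, List.drop_left' (by simp)]
          rw [htake, hdrop]
        by_cases hconc : conc = ""
        · have hgrp : grp = [] := pvTrail_eq_nil grp (by rw [← hc, hconc]; rfl)
          have hflush : conc ++ t' = PySem.Str.join ", " (grp ++ [t']) := pvFlush_eq _ _ _ hc
          rw [hconc] at hflush
          have hj : PySem.Str.join ", " (grp ++ [t']) = t' := by
            rw [← hflush]; exact String.empty_append
          rw [hconc, pvStepA_flush_empty sd ed sdc edc res t ht heq]
          simp only [← ht']
          rw [ih _ _ _ _ [] g rfl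
            (by simp only [pvBal, List.map_nil, List.sum_nil, Nat.cast_add]; omega)
            (by intro k h1 h2; simp at h2; omega)
            (by simp only [List.nil_append, ← hrest]; omega)]
          rw [hgr, hj]
          simp
        · have hflush := pvFlush_eq conc t' grp hc
          rw [pvStepA_flush_conc sd ed sdc edc res conc t ht heq hconc]
          simp only [← ht']
          rw [ih _ _ _ _ [] g rfl
            (by simp only [pvBal, List.map_nil, List.sum_nil, Nat.cast_add]; omega)
            (by intro k h1 h2; simp at h2; omega)
            (by simp only [List.nil_append, ← hrest]; omega)]
          rw [hgr, hflush]
          simp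
      · -- unbalanced: A accumulates, the ghost group grows
        have hneZ : (sdc : Int) + (PySem.Str.count t' sd : Int)
            ≠ (edc : Int) + (PySem.Str.count t' ed : Int) := by
          intro h; exact heq (by exact_mod_cast h)
        rw [pvStepA_accum sd ed sdc edc res conc t ht heq]
        simp only [← ht']
        have hb' : ((sdc + PySem.Str.count t' sd : Nat) : Int) - ((edc + PySem.Str.count t' ed : Nat) : Int)
            = pvBal sd ed (grp ++ [t']) := by
          rw [hap, ← hb]; unfold pvDelta; simp only [Nat.cast_add]; ring
        have hpre' : ∀ k, 1 ≤ k → k ≤ (grp ++ [t']).length → pvBal sd ed ((grp ++ [t']).take k) ≠ 0 := by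
          intro k h1 h2
          simp only [List.length_append, List.length_cons, List.length_nil] at h2
          by_cases hk : k ≤ grp.length
          · rw [List.take_append_of_le_length hk]
            exact hpre k h1 hk
          · have hk1 : k = grp.length + 1 := by omega
            subst hk1
            have hfull : grp.length + 1 = (grp ++ [t']).length := by simp
            rw [hfull, List.take_length]
            rw [← hb']; simp only [Nat.cast_add]; omega
        rw [ih _ _ _ _ (grp ++ [t']) gfuel
          (by simp only [String.toList_append, hc, pvTrail_append]) hb' hpre'
          (by simp only [List.length_append, List.length_cons, List.length_nil, ← hrest]; omega)]
        congr 2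
        simp
-- ===== VERDICT (by name: the statement is the Claim_ definition above) =====
theorem reconcatenate_nested_object_spec : Claim_equal_reconcatenate_nested_object := by
  intro array_tokens sd ed _
  unfold Spec_reconcatenate_nested_object reconcatenate_nested_object reconcatenate_nested_object_alt
  rw [pvMain sd ed array_tokens 0 0 [] "" []
    (((array_tokens.map PySem.Str.strip).filter (fun t => t ≠ "")).length + 1) rfl
    (by simp [pvBal]) (by intro k h1 h2; simp at h2; omega) (by simp)]
  rw [pvLoopB_eq_groups sd ed ((array_tokens.map PySem.Str.strip).filter (fun t => t ≠ ""))
    (((array_tokens.map PySem.Str.strip).filter (fun t => t ≠ "")).length + 1)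
    (((array_tokens.map PySem.Str.strip).filter (fun t => t ≠ "")).length + 1) 0 []
    (by omega) (by simp)]
  simp
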